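-- pv_equiv track=rewrite | github.com/lubos374/microgpt-lean | self_edit/declarations.py | trim_trailing_comment_suffix
-- ===== SOURCE A (Python) =====
-- def trim_trailing_comment_suffix(block_lines: list[str]) -> list[str]:
--     end = len(block_lines)
--     while end > 0 and block_lines[end - 1].strip() == "":
--         end -= 1
--     while end > 0:
--         stripped = block_lines[end - 1].lstrip()
--         if stripped.startswith("/--") or stripped.startswith("--") or stripped.startswith("/-") or stripped == "-/":
--             end -= 1
--             while end > 0 and block_lines[end - 1].strip() == "":
--                 end -= 1
--             continue
--         break
--     return block_lines[:end]
-- ===== SOURCE B (Python) =====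
-- def trim_trailing_comment_suffix(block_lines: list[str]) -> list[str]:
--     last_real = -1
--     for i, line in enumerate(block_lines):
--         stripped = line.strip()
--         lead = line.lstrip()
--         if stripped != "" and not (
--             lead.startswith("/--") or lead.startswith("--") or lead.startswith("/-") or lead == "-/"
--         ):
--             last_real = i
--     return block_lines[: last_real + 1]
-- ===== Notes on version B (the rewrite author's own statement) =====
-- stated objective: alternative
-- what changed: Replaces A's backward cursor with its nested blank-skipping while-loops by a single forward enumerate pass that tracks the index of the last non-blank non-comment line and slices up to it.
import Mathlib
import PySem

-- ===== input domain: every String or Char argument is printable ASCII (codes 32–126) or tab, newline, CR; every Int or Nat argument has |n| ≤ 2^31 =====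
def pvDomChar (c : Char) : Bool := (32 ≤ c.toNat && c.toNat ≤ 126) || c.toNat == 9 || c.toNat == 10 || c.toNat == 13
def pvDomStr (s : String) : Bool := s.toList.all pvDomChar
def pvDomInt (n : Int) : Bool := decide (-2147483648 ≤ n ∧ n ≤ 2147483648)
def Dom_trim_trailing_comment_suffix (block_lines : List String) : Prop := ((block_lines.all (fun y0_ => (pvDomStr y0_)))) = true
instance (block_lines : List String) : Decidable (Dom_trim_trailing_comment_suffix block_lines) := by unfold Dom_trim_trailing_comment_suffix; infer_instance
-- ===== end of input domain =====

-- B replaces A's backward cursor (nested blank-skipping while loops) by one forward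
-- scan that remembers the index of the last significant line; same cost, plainer shape.

-- ===== PORT A =====
-- 'while end > 0 and block_lines[end - 1].strip() == "": end -= 1'
def pvA_skip (bl : List String) : Nat → Nat
  | 0 => 0
  | n + 1 => if PySem.Str.strip (bl.getD n "") == "" then pvA_skip bl n else n + 1

theorem pvA_skip_le (bl : List String) : ∀ n, pvA_skip bl n ≤ n := by
  intro n
  induction n with
  | zero => simp [pvA_skip]
  | succ k ih => simp only [pvA_skip]; split <;> omega

-- the outer 'while end > 0: … continue/break' loop of A
def pvA_loop (bl : List String) : Nat → Nat
  | 0 => 0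
  | n + 1 =>
    let stripped := PySem.Str.lstrip (bl.getD n "")
    if PySem.Str.startswith stripped "/--" || PySem.Str.startswith stripped "--" ||
        PySem.Str.startswith stripped "/-" || stripped == "-/" then
      pvA_loop bl (pvA_skip bl n)
    else n + 1
  decreasing_by exact Nat.lt_succ_of_le (pvA_skip_le bl n)

def trim_trailing_comment_suffix (block_lines : List String) : List String :=
  PySem.List.slice block_lines none
    (some ((pvA_loop block_lines (pvA_skip block_lines block_lines.length) : Nat) : Int))

-- ===== PORT B =====
-- the body of B's 'for i, line in enumerate(block_lines)' loop test
def pvB_real (line : String) : Bool :=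
  let stripped := PySem.Str.strip line
  let lead := PySem.Str.lstrip line
  stripped != "" &&
    !(PySem.Str.startswith lead "/--" || PySem.Str.startswith lead "--" ||
      PySem.Str.startswith lead "/-" || lead == "-/")

def trim_trailing_comment_suffix_alt (block_lines : List String) : List String :=
  let last_real : Int :=
    (PySem.List.enumerate block_lines).foldl
      (fun acc p => if pvB_real p.2 then p.1 else acc) (-1)
  PySem.List.slice block_lines none (some (last_real + 1))

-- ===== PRECONDITION & SPEC =====
def Spec_trim_trailing_comment_suffix (block_lines : List String) (out : List String) : Prop := out = trim_trailing_comment_suffix_alt block_lines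
instance (block_lines : List String) (out : List String) : Decidable (Spec_trim_trailing_comment_suffix block_lines out) := by unfold Spec_trim_trailing_comment_suffix; infer_instance

-- ===== CLAIM (what is proved, stated in full; the proofs are below) =====
def Claim_equal_trim_trailing_comment_suffix : Prop := ∀ (block_lines : List String), Dom_trim_trailing_comment_suffix block_lines → Spec_trim_trailing_comment_suffix block_lines (trim_trailing_comment_suffix block_lines)

-- ===== LEMMAS AND PROOFS =====

-- common reference cursor: length of the prefix ending at the last significant line among the first n
def pvEnd (bl : List String) : Nat → Nat
  | 0 => 0
  | n + 1 => if pvB_real (bl.getD n "") then n + 1 else pvEnd bl n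

theorem pvA_skip_succ (bl : List String) (k : Nat) :
    pvA_skip bl (k + 1)
      = if PySem.Str.strip (bl.getD k "") == "" then pvA_skip bl k else k + 1 := rfl

theorem pvA_loop_succ (bl : List String) (k : Nat) :
    pvA_loop bl (k + 1)
      = if (PySem.Str.startswith (PySem.Str.lstrip (bl.getD k "")) "/--" ||
            PySem.Str.startswith (PySem.Str.lstrip (bl.getD k "")) "--" ||
            PySem.Str.startswith (PySem.Str.lstrip (bl.getD k "")) "/-" ||
            PySem.Str.lstrip (bl.getD k "") == "-/")
        then pvA_loop bl (pvA_skip bl k) else k + 1 := by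
  rw [pvA_loop]

theorem pvEnd_succ (bl : List String) (k : Nat) :
    pvEnd bl (k + 1) = if pvB_real (bl.getD k "") then k + 1 else pvEnd bl k := rfl

theorem pvB_real_of_blank {s : String} (hb : (PySem.Str.strip s == "") = true) :
    pvB_real s = false := by
  simp only [pvB_real, bne, hb, Bool.not_true, Bool.false_and]

theorem pvB_real_of_nonblank {s : String} (hb : (PySem.Str.strip s == "") = false) :
    pvB_real s
      = !(PySem.Str.startswith (PySem.Str.lstrip s) "/--" ||
          PySem.Str.startswith (PySem.Str.lstrip s) "--" ||
          PySem.Str.startswith (PySem.Str.lstrip s) "/-" ||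
          PySem.Str.lstrip s == "-/") := by
  simp only [pvB_real, bne, hb, Bool.not_false, Bool.true_and]

theorem pvA_eq_pvEnd (bl : List String) : ∀ n, pvA_loop bl (pvA_skip bl n) = pvEnd bl n := by
  intro n
  induction n with
  | zero => simp only [pvA_skip, pvA_loop, pvEnd]
  | succ k ih =>
    cases hb : (PySem.Str.strip (bl.getD k "") == "") with
    | true =>
      rw [pvA_skip_succ, if_pos hb, ih, pvEnd_succ,
        if_neg (by rw [pvB_real_of_blank hb]; exact Bool.false_ne_true)]
    | false =>
      rw [pvA_skip_succ, if_neg (by rw [hb]; exact Bool.false_ne_true), pvA_loop_succ]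
      cases hc : (PySem.Str.startswith (PySem.Str.lstrip (bl.getD k "")) "/--" ||
          PySem.Str.startswith (PySem.Str.lstrip (bl.getD k "")) "--" ||
          PySem.Str.startswith (PySem.Str.lstrip (bl.getD k "")) "/-" ||
          PySem.Str.lstrip (bl.getD k "") == "-/") with
      | true =>
        rw [if_pos rfl, ih, pvEnd_succ,
          if_neg (by rw [pvB_real_of_nonblank hb, hc]; exact Bool.false_ne_true)]
      | false =>
        rw [if_neg Bool.false_ne_true, pvEnd_succ,
          if_pos (by rw [pvB_real_of_nonblank hb, hc]; rfl)]

theorem pvEnd_append (bl : List String) (x : String) :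
    ∀ n, n ≤ bl.length → pvEnd (bl ++ [x]) n = pvEnd bl n := by
  intro n
  induction n with
  | zero => simp [pvEnd]
  | succ k ih =>
    intro h
    have hk : k < bl.length := by omega
    have hget : (bl ++ [x]).getD k "" = bl.getD k "" := by
      simp [List.getD, List.getElem?_append_left hk]
    simp only [pvEnd, hget, ih (by omega)]

theorem pvEnum_append (bl : List String) (x : String) :
    ∀ s : Int, PySem.List.enumerate (bl ++ [x]) s
      = PySem.List.enumerate bl s ++ [(s + bl.length, x)] := by
  induction bl with
  | nil => intro s; simp [PySem.List.enumerate_nil, PySem.List.enumerate_cons]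
  | cons y ys ih =>
    intro s
    simp only [List.cons_append, PySem.List.enumerate_cons, ih (s + 1)]
    simp; ring_nf

theorem pvB_eq_pvEnd (bl : List String) :
    (PySem.List.enumerate bl).foldl (fun acc p => if pvB_real p.2 then p.1 else acc) (-1 : Int) + 1
      = (pvEnd bl bl.length : Int) := by
  induction bl using List.reverseRecOn with
  | nil => simp [PySem.List.enumerate_nil, pvEnd]
  | append_singleton ys x ih =>
    rw [pvEnum_append ys x 0, List.foldl_append]
    simp only [List.foldl_cons, List.foldl_nil]
    by_cases hr : pvB_real x = true
    · have hget : (ys ++ [x]).getD ys.length "" = x := by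
        simp [List.getD]
      simp only [hr, if_true]
      rw [show (ys ++ [x]).length = ys.length + 1 by simp]
      simp only [pvEnd, hget, hr, if_true]
      push_cast; ring
    · simp only [hr]
      have hget : (ys ++ [x]).getD ys.length "" = x := by
        simp [List.getD]
      rw [show (ys ++ [x]).length = ys.length + 1 by simp]
      simp only [pvEnd, hget, hr]
      rw [pvEnd_append ys x ys.length (le_refl _)]
      exact ih

-- ===== VERDICT (by name: the statement is the Claim_ definition above) =====
theorem trim_trailing_comment_suffix_spec : Claim_equal_trim_trailing_comment_suffix := by
  intro bl _
  unfold Spec_trim_trailing_comment_suffix trim_trailing_comment_suffix trim_trailing_comment_suffix_alt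
  rw [pvA_eq_pvEnd bl bl.length, ← pvB_eq_pvEnd bl]
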